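-- pv_equiv track=rewrite | github.com/lvyunlv/LVT | tiny_table.py | query
-- ===== SOURCE A (Python) =====
-- def split_x(x, delta_bits, sub_bits_list):
--     indices = []
--     shift = delta_bits
--     for bits in sub_bits_list:
--         shift -= bits
--         mask = (1 << bits) - 1
--         indices.append((x >> shift) & mask)
--     return indices
--
-- def query(x, sub_tables, sub_bits_list, value_bits):
--     indices = split_x(x, sum(sub_bits_list), sub_bits_list)
--     k = len(sub_tables)
--     value_sub_bits = [value_bits // k for _ in range(k)]
--     reconstructed = 0
--     for i in range(k):
--         shift = value_bits - sum(value_sub_bits[:i+1])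
--         part = sub_tables[i][indices[i]]
--         reconstructed |= part << shift
--     return reconstructed
-- ===== SOURCE B (Python) =====
-- def query(x, sub_tables, sub_bits_list, value_bits):
--     # Walk the tables BACKWARDS (last part first), building the result back-to-front:
--     # the input shift and output shift both start at their smallest values and only
--     # grow by additions, so no running total / prefix sums of bit widths are needed.
--     k = len(sub_tables)
--     per = value_bits // k if k else 0
--     shift_in = sum(sub_bits_list[k:])
--     shift_out = value_bits - k * per
--     reconstructed = 0
--     for i in range(k - 1, -1, -1):
--         bits = sub_bits_list[i]
--         reconstructed |= sub_tables[i][(x >> shift_in) & ((1 << bits) - 1)] << shift_out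
--         shift_in += bits
--         shift_out += per
--     return reconstructed
-- ===== Notes on version B (the rewrite author's own statement) =====
-- stated objective: alternative
-- what changed: B builds the result back-to-front: it traverses the tables in reverse with range(k-1,-1,-1), so both shifts start at their minima and grow by pure addition (no total bit-width sum, no indices list, no per-iteration sum(value_sub_bits[:i+1]) prefix-slice re-summation); correctness rests on | being order-independent, which the Lean proof establishes.
import Mathlib
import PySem

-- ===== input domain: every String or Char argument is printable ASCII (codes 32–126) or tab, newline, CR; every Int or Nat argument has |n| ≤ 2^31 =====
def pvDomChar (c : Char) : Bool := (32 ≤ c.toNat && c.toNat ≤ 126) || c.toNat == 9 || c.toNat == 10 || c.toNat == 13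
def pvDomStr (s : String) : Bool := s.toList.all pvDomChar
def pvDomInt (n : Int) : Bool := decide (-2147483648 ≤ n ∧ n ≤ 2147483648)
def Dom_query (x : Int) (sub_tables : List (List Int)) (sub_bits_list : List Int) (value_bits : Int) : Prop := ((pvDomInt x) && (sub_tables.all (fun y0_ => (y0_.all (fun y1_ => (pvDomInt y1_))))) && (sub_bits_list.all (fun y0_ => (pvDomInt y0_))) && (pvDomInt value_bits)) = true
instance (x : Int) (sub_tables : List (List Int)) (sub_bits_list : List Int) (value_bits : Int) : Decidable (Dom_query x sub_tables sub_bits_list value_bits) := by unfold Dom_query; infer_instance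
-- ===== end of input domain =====

-- B traverses the tables in REVERSE, building the result back-to-front with purely additive
-- running shifts, instead of A's forward two-pass scheme (split_x index list + prefix-slice
-- sums); correctness uses that bitwise-or is order-independent (objective: alternative).

-- ===== PORT A =====
def split_x (x : Int) (delta_bits : Int) (sub_bits_list : List Int) : List Int :=
  (sub_bits_list.foldl
    (fun (st : List Int × Int) bits =>
      let shift := st.2 - bits
      let mask : Int := (1 <<< bits.toNat) - 1
      (st.1 ++ [PySem.Int.band (x >>> shift.toNat) mask], shift))
    ([], delta_bits)).1

def query (x : Int) (sub_tables : List (List Int)) (sub_bits_list : List Int) (value_bits : Int) : Int :=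
  let indices := split_x x (sub_bits_list.foldl (· + ·) 0) sub_bits_list
  let k := sub_tables.length
  let value_sub_bits := (List.range k).map (fun _ => PySem.Int.floordiv value_bits (k : Int))
  (List.range k).foldl
    (fun reconstructed i =>
      let shift := value_bits - ((value_sub_bits.take (i + 1)).foldl (· + ·) 0)
      let part := PySem.List.pyGetD (PySem.List.pyGetD sub_tables (i : Int) [])
                    (PySem.List.pyGetD indices (i : Int) 0) 0
      PySem.Int.bor reconstructed (part <<< shift.toNat))
    0

-- ===== PORT B =====
-- Source B: walk i = k-1 … 0 (range(k-1,-1,-1) = (List.range k).reverse), state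
-- (reconstructed, shift_in, shift_out); shifts start at their minima and only grow.
def query_alt (x : Int) (sub_tables : List (List Int)) (sub_bits_list : List Int) (value_bits : Int) : Int :=
  let k := sub_tables.length
  let per : Int := if k = 0 then 0 else PySem.Int.floordiv value_bits (k : Int)
  ((List.range k).reverse.foldl
    (fun (s : Int × Int × Int) (i : Nat) =>
      let bits := PySem.List.pyGetD sub_bits_list (i : Int) 0
      (PySem.Int.bor s.1
         (PySem.List.pyGetD (PySem.List.pyGetD sub_tables (i : Int) [])
            (PySem.Int.band (x >>> s.2.1.toNat) ((1 <<< bits.toNat) - 1)) 0 <<< s.2.2.toNat),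
       s.2.1 + bits, s.2.2 + per))
    (0, (sub_bits_list.drop k).foldl (· + ·) 0, value_bits - (k : Int) * per)).1

-- ===== PRECONDITION & SPEC =====
-- Pre_query holds exactly where the Python A returns normally: all bit widths nonnegative
-- (else `1 << bits` / `x >> shift` raise ValueError), enough bit widths for the tables
-- (else IndexError on indices[i]), every output shift nonnegative (the smallest one is
-- value_bits - value_bits//k; else ValueError on `part << shift`), and every computed
-- sub-table index in range (else IndexError).
def Pre_query (x : Int) (sub_tables : List (List Int)) (sub_bits_list : List Int) (value_bits : Int) : Prop :=
  (∀ b ∈ sub_bits_list, 0 ≤ b) ∧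
  sub_tables.length ≤ sub_bits_list.length ∧
  (sub_tables.length = 0 ∨ 0 ≤ value_bits - PySem.Int.floordiv value_bits (sub_tables.length : Int)) ∧
  ∀ i < sub_tables.length,
    PySem.Int.band (x >>> ((sub_bits_list.drop (i + 1)).foldl (· + ·) 0).toNat)
        ((1 <<< (sub_bits_list.getD i 0).toNat) - 1)
      < ((sub_tables.getD i []).length : Int)

instance (x : Int) (sub_tables : List (List Int)) (sub_bits_list : List Int) (value_bits : Int) : Decidable (Pre_query x sub_tables sub_bits_list value_bits) := by unfold Pre_query; infer_instance

def pvWitness_query : Int × List (List Int) × List Int × Int := (3, [[10, 20, 30, 40]], [2], 4)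

def Spec_query (x : Int) (sub_tables : List (List Int)) (sub_bits_list : List Int) (value_bits : Int) (out : Int) : Prop := out = query_alt x sub_tables sub_bits_list value_bits
instance (x : Int) (sub_tables : List (List Int)) (sub_bits_list : List Int) (value_bits : Int) (out : Int) : Decidable (Spec_query x sub_tables sub_bits_list value_bits out) := by unfold Spec_query; infer_instance

-- ===== CLAIM (what is proved, stated in full; the proofs are below) =====
def Claim_equal_query : Prop := ∀ (x : Int) (sub_tables : List (List Int)) (sub_bits_list : List Int) (value_bits : Int), Dom_query x sub_tables sub_bits_list value_bits → Pre_query x sub_tables sub_bits_list value_bits → Spec_query x sub_tables sub_bits_list value_bits (query x sub_tables sub_bits_list value_bits)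

-- ===== LEMMAS AND PROOFS =====

-- ---- bitwise-or algebra: PySem.Int.bor is Mathlib's Int.lor, hence associative ----

lemma nat_sub_and (n : Nat) : ∀ m : Nat, n - (n &&& m) = Nat.ldiff n m := by
  induction n using Nat.binaryRec with
  | zero => intro m; simp [Nat.ldiff]
  | bit b n ih =>
    intro m
    have hm : m = Nat.bit m.bodd m.div2 := (Nat.bit_bodd_div2 m).symm
    rw [hm, Nat.land_bit, Nat.ldiff_bit]
    have hle : n &&& m.div2 ≤ n := Nat.and_le_left
    have ihd := ih m.div2
    cases b <;> cases hb : m.bodd <;>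
      simp [Nat.bit_val, ← ihd] <;> omega

lemma pybor_eq_lor (a b : Int) : PySem.Int.bor a b = Int.lor a b := by
  rcases a with m | m <;> rcases b with n | n <;>
    simp [PySem.Int.bor, Int.lor, Int.negSucc_eq, nat_sub_and] <;> ring_nf <;> omega

lemma lor_assoc' (a b c : Int) : Int.lor (Int.lor a b) c = Int.lor a (Int.lor b c) := by
  rcases a with m | m <;> rcases b with n | n <;> rcases c with p | p <;>
    simp [Int.lor] <;>
    · apply Nat.eq_of_testBit_eq
      intro i
      simp [Nat.testBit_ldiff, Nat.testBit_or, Nat.testBit_and]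
      cases m.testBit i <;> cases n.testBit i <;> cases p.testBit i <;> rfl

lemma pybor_assoc (a b c : Int) :
    PySem.Int.bor (PySem.Int.bor a b) c = PySem.Int.bor a (PySem.Int.bor b c) := by
  simp [pybor_eq_lor, lor_assoc']

lemma foldl_bor_pull (t : List Int) : ∀ (a h : Int),
    t.foldl PySem.Int.bor (PySem.Int.bor a h) = PySem.Int.bor (t.foldl PySem.Int.bor a) h := by
  induction t with
  | nil => intro a h; rfl
  | cons y t ih =>
    intro a h
    simp only [List.foldl_cons]
    rw [pybor_assoc a h y, PySem.Int.bor_comm h y, ← pybor_assoc a y h, ih]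

lemma foldl_bor_reverse (l : List Int) (a : Int) :
    l.reverse.foldl PySem.Int.bor a = l.foldl PySem.Int.bor a := by
  induction l generalizing a with
  | nil => rfl
  | cons h t ih =>
    simp only [List.reverse_cons, List.foldl_append, List.foldl_cons, List.foldl_nil, ih]
    rw [foldl_bor_pull]

lemma foldl_borc_reverse (c : Nat → Int) (l : List Nat) (a : Int) :
    l.reverse.foldl (fun acc i => PySem.Int.bor acc (c i)) a
      = l.foldl (fun acc i => PySem.Int.bor acc (c i)) a := by
  simp only [← List.foldl_map (f := c) (g := PySem.Int.bor)]
  rw [List.map_reverse]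
  exact foldl_bor_reverse (l.map c) a

-- ---- arithmetic over the shift sums ----

lemma foldl0_eq_sum (l : List Int) : l.foldl (· + ·) 0 = l.sum := by
  rw [List.sum_eq_foldl]

lemma drop_sum_succ (l : List Int) (n : Nat) :
    l.getD n 0 + (l.drop (n + 1)).sum = (l.drop n).sum := by
  by_cases h : n < l.length
  · rw [List.drop_eq_getElem_cons h, List.sum_cons, List.getD_eq_getElem l 0 h]
  · rw [List.getD_eq_default _ _ (by omega), List.drop_of_length_le (by omega),
        List.drop_of_length_le (by omega)]
    simp

lemma foldl_add_replicate (c a : Int) (m : Nat) : (List.replicate m c).foldl (· + ·) a = a + m * c := by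
  induction m generalizing a with
  | zero => simp
  | succ p ih =>
    rw [List.replicate_succ, List.foldl_cons, ih]
    push_cast
    ring

-- ---- the common per-part contribution ----
-- contribution of part i: table value at the i-th extracted index, shifted to its slot
def pvContrib (x : Int) (sub_tables : List (List Int)) (sub_bits_list : List Int)
    (value_bits per : Int) (i : Nat) : Int :=
  PySem.List.pyGetD (PySem.List.pyGetD sub_tables (i : Int) [])
      (PySem.Int.band (x >>> ((sub_bits_list.drop (i + 1)).sum).toNat)
        (((1 <<< (sub_bits_list.getD i 0).toNat : Nat) : Int) - 1)) 0
    <<< (value_bits - ((i : Int) + 1) * per).toNat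

-- ---- A's fold produces the forward bor-fold of the contributions ----

lemma splitx_go (x : Int) (sbl : List Int) : ∀ (acc : List Int) (d : Int),
    (sbl.foldl
      (fun (st : List Int × Int) bits =>
        let shift := st.2 - bits
        let mask : Int := (1 <<< bits.toNat) - 1
        (st.1 ++ [PySem.Int.band (x >>> shift.toNat) mask], shift))
      (acc, d)).1
    = acc ++ (sbl.foldl
      (fun (st : List Int × Int) bits =>
        let shift := st.2 - bits
        let mask : Int := (1 <<< bits.toNat) - 1
        (st.1 ++ [PySem.Int.band (x >>> shift.toNat) mask], shift))
      ([], d)).1 := by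
  induction sbl with
  | nil => intro acc d; simp
  | cons b t ih =>
    intro acc d
    simp only [List.foldl_cons, List.nil_append]
    rw [ih, ih [PySem.Int.band (x >>> (d - b).toNat) ((1 <<< b.toNat) - 1)]]
    simp

lemma split_x_cons (x d b : Int) (t : List Int) :
    split_x x d (b :: t)
      = PySem.Int.band (x >>> (d - b).toNat) ((1 <<< b.toNat) - 1) :: split_x x (d - b) t := by
  unfold split_x
  simp only [List.foldl_cons]
  rw [splitx_go]
  simp

lemma split_x_length (x : Int) (sbl : List Int) : ∀ d, (split_x x d sbl).length = sbl.length := by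
  induction sbl with
  | nil => intro d; rfl
  | cons b t ih => intro d; rw [split_x_cons]; simp [ih]

lemma split_x_getD (x : Int) (sbl : List Int) : ∀ (d : Int) (i : Nat), i < sbl.length →
    (split_x x d sbl).getD i 0
      = PySem.Int.band (x >>> (d - (sbl.take (i + 1)).sum).toNat)
          ((1 <<< (sbl.getD i 0).toNat) - 1) := by
  induction sbl with
  | nil => intro d i h; simp at h
  | cons b t ih =>
    intro d i h
    rw [split_x_cons]
    cases i with
    | zero => simp
    | succ n =>
      simp only [List.getD_cons_succ, List.take_succ_cons, List.sum_cons]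
      rw [ih (d - b) n (by simpa using h)]
      ring_nf

lemma query_eq_forward (x : Int) (sub_tables : List (List Int)) (sub_bits_list : List Int)
    (value_bits : Int) :
    query x sub_tables sub_bits_list value_bits
      = (List.range sub_tables.length).foldl
          (fun acc i => PySem.Int.bor acc
            (pvContrib x sub_tables sub_bits_list value_bits
              (if sub_tables.length = 0 then 0
               else PySem.Int.floordiv value_bits (sub_tables.length : Int)) i)) 0 := by
  simp only [query]
  apply PySem.List.foldl_congr_mem
  intro acc i hi
  rw [List.mem_range] at hi
  have hk : sub_tables.length ≠ 0 := by omega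
  simp only [if_neg hk, PySem.List.pyGetD_natCast]
  -- output shift: take (i+1) of a constant list sums to (i+1)*per
  have hshift : value_bits -
      ((((List.range sub_tables.length).map
          (fun _ => PySem.Int.floordiv value_bits (sub_tables.length : Int))).take (i + 1)).foldl (· + ·) 0)
      = value_bits - ((i : Int) + 1) * PySem.Int.floordiv value_bits (sub_tables.length : Int) := by
    rw [List.map_const', List.length_range, List.take_replicate, Nat.min_eq_left (by omega),
        foldl_add_replicate]
    push_cast
    ring
  -- extracted index: entry i of split_x is the masked suffix-shifted value
  have hidx : (split_x x (sub_bits_list.foldl (· + ·) 0) sub_bits_list).getD i 0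
      = PySem.Int.band (x >>> ((sub_bits_list.drop (i + 1)).sum).toNat)
          ((1 <<< (sub_bits_list.getD i 0).toNat) - 1) := by
    by_cases hlen : i < sub_bits_list.length
    · rw [split_x_getD x sub_bits_list _ i hlen, foldl0_eq_sum]
      have : sub_bits_list.sum - (sub_bits_list.take (i + 1)).sum
          = (sub_bits_list.drop (i + 1)).sum := by
        have := List.sum_take_add_sum_drop sub_bits_list (i + 1)
        omega
      rw [this]
    · rw [List.getD_eq_default _ _ (by rw [split_x_length]; omega),
          List.getD_eq_default _ _ (by omega), List.drop_of_length_le (by omega)]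
      simp [PySem.Int.band_zero]
  rw [hshift, hidx]
  simp [pvContrib, PySem.List.pyGetD_natCast]

-- ---- B's stateful reverse fold produces the reverse bor-fold of the contributions ----

lemma alt_invariant (x : Int) (sub_tables : List (List Int)) (sub_bits_list : List Int)
    (value_bits per : Int) : ∀ (n : Nat) (a : Int),
    ((List.range n).reverse.foldl
      (fun (s : Int × Int × Int) (i : Nat) =>
        let bits := PySem.List.pyGetD sub_bits_list (i : Int) 0
        (PySem.Int.bor s.1
           (PySem.List.pyGetD (PySem.List.pyGetD sub_tables (i : Int) [])
              (PySem.Int.band (x >>> s.2.1.toNat) ((1 <<< bits.toNat) - 1)) 0 <<< s.2.2.toNat),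
         s.2.1 + bits, s.2.2 + per))
      (a, (sub_bits_list.drop n).sum, value_bits - (n : Int) * per)).1
    = (List.range n).reverse.foldl
        (fun acc i => PySem.Int.bor acc (pvContrib x sub_tables sub_bits_list value_bits per i)) a := by
  intro n
  induction n with
  | zero => intro a; rfl
  | succ n ih =>
    intro a
    rw [List.range_succ, List.reverse_append]
    simp only [List.reverse_cons, List.reverse_nil, List.nil_append, List.singleton_append,
      List.foldl_cons, PySem.List.pyGetD_natCast]
    have h2 : (sub_bits_list.drop (n + 1)).sum + sub_bits_list.getD n 0
        = (sub_bits_list.drop n).sum := by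
      have := drop_sum_succ sub_bits_list n
      omega
    have h3 : value_bits - ((n + 1 : Nat) : Int) * per + per = value_bits - (n : Int) * per := by
      push_cast
      ring
    simp only [PySem.List.pyGetD_natCast] at ih
    rw [h2, h3, ih]
    congr 2
    simp only [pvContrib, PySem.List.pyGetD_natCast]
    push_cast
    ring_nf

theorem query_eq_alt (x : Int) (sub_tables : List (List Int)) (sub_bits_list : List Int)
    (value_bits : Int) :
    query x sub_tables sub_bits_list value_bits = query_alt x sub_tables sub_bits_list value_bits := by
  rw [query_eq_forward]
  simp only [query_alt]
  rw [show ((sub_bits_list.drop sub_tables.length).foldl (· + ·) 0)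
        = (sub_bits_list.drop sub_tables.length).sum from foldl0_eq_sum _,
      alt_invariant, foldl_borc_reverse]

-- ===== VERDICT (by name: the statement is the Claim_ definition above) =====
theorem query_spec : Claim_equal_query := by
  intro x st sbl vb _ _
  unfold Spec_query
  exact query_eq_alt x st sbl vb
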